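-- pv_equiv track=rewrite | github.com/juanmanuelferrera/vedabase-amazon-books | generate_interior.py | format_verse_block
-- ===== SOURCE A (Python) =====
-- def format_verse_block(verses):
--     """Format verse block, splitting into stanzas of 4 lines if needed"""
--     if len(verses) <= 4:
--         html = '<div class="sanskrit-verse">\n'
--         for v in verses:
--             html += f'  <p>{v}</p>\n'
--         html += '</div>'
--         return html
--     else:
--         # Split into stanzas of 4 lines
--         html = '<div class="sanskrit-verse">\n'
--         for i, v in enumerate(verses):
--             html += f'  <p>{v}</p>\n'
--             # Add stanza break after every 4 lines (except at the end)
--             if (i + 1) % 4 == 0 and i + 1 < len(verses):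
--                 html += '  <p class="stanza-break"></p>\n'
--         html += '</div>'
--         return html
-- ===== SOURCE B (Python) =====
-- def format_verse_block(verses):
--     """Format verse block, splitting into stanzas of 4 lines if needed"""
--     chunks = [verses[i:i + 4] for i in range(0, len(verses), 4)]
--     groups = [''.join(f'  <p>{v}</p>\n' for v in chunk) for chunk in chunks]
--     body = '  <p class="stanza-break"></p>\n'.join(groups)
--     return '<div class="sanskrit-verse">\n' + body + '</div>'
-- ===== Notes on version B (the rewrite author's own statement) =====
-- stated objective: simpler
-- what changed: Replaced A's two code paths (a special <=4 branch plus an enumerate loop testing (i+1)%4 and position) by a single group-and-join: slice the verses into chunks of 4, render each chunk, and join the chunk strings with the stanza-break separator.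
import Mathlib
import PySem

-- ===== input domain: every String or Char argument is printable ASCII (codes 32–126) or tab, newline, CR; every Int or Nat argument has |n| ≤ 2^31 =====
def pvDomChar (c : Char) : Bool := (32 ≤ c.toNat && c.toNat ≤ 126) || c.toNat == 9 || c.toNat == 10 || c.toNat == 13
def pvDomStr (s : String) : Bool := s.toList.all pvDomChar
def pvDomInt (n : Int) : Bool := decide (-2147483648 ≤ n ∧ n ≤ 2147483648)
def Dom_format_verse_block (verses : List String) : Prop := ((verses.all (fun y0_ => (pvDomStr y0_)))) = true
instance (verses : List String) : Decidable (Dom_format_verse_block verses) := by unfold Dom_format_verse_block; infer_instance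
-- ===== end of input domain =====

-- B replaces A's two code paths (<=4 special case + modulo scan) by chunking into groups of 4 and
-- joining the rendered groups with the stanza-break separator; objective: simpler.

-- ===== PORT A =====
-- string building is ported on List Char (PySem convention); String.ofList at the end
def format_verse_block (verses : List String) : String :=
  if verses.length ≤ 4 then
    String.ofList
      ((verses.foldl (fun h v => h ++ "  <p>".toList ++ v.toList ++ "</p>\n".toList)
        "<div class=\"sanskrit-verse\">\n".toList) ++ "</div>".toList)
  else
    String.ofList
      (((PySem.List.enumerate verses 0).foldl
          (fun h p =>
            let h := h ++ "  <p>".toList ++ p.2.toList ++ "</p>\n".toList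
            if PySem.Int.mod (p.1 + 1) 4 = 0 ∧ p.1 + 1 < (verses.length : Int) then
              h ++ "  <p class=\"stanza-break\"></p>\n".toList
            else h)
          "<div class=\"sanskrit-verse\">\n".toList) ++ "</div>".toList)

-- ===== PORT B =====
-- chunks of 4 (verses[i:i+4] for i in range(0, len, 4))
def fvbChunks (l : List String) : List (List String) :=
  match l with
  | [] => []
  | x :: xs => (x :: xs.take 3) :: fvbChunks (xs.drop 3)
termination_by l.length
decreasing_by simp

-- ''.join(f'  <p>{v}</p>\n' for v in chunk)
def fvbGroup (c : List String) : List Char :=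
  (c.map (fun v => "  <p>".toList ++ v.toList ++ "</p>\n".toList)).flatten

def format_verse_block_alt (verses : List String) : String :=
  String.ofList
    ("<div class=\"sanskrit-verse\">\n".toList ++
     (List.intercalate "  <p class=\"stanza-break\"></p>\n".toList
        ((fvbChunks verses).map fvbGroup)) ++
     "</div>".toList)

-- ===== PRECONDITION & SPEC =====
def Spec_format_verse_block (verses : List String) (out : String) : Prop := out = format_verse_block_alt verses
instance (verses : List String) (out : String) : Decidable (Spec_format_verse_block verses out) := by unfold Spec_format_verse_block; infer_instance

-- ===== CLAIM (what is proved, stated in full; the proofs are below) =====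
def Claim_equal_format_verse_block : Prop := ∀ (verses : List String), Dom_format_verse_block verses → Spec_format_verse_block verses (format_verse_block verses)

-- ===== LEMMAS AND PROOFS =====

-- the per-verse line, shared vocabulary for the lemmas
def fvbLine (v : String) : List Char := "  <p>".toList ++ v.toList ++ "</p>\n".toList

-- A's else-loop body as a flatMap over the enumerated list
def fvbG (n : Nat) (p : Int × String) : List Char :=
  fvbLine p.2 ++
    (if PySem.Int.mod (p.1 + 1) 4 = 0 ∧ p.1 + 1 < (n : Int) then
       "  <p class=\"stanza-break\"></p>\n".toList
     else [])

theorem fvbGroup_flatMap (c : List String) : c.flatMap fvbLine = fvbGroup c := by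
  rw [List.flatMap_def]; rfl

theorem fvbChunks_small (x : String) (xs : List String) (h : xs.length ≤ 3) :
    fvbChunks (x :: xs) = [x :: xs] := by
  rw [fvbChunks.eq_def]
  simp [List.take_of_length_le h, List.drop_eq_nil_of_le h, fvbChunks]

theorem fvbA_loop1 (verses : List String) (acc : List Char) :
    verses.foldl (fun h v => h ++ "  <p>".toList ++ v.toList ++ "</p>\n".toList) acc
      = acc ++ verses.flatMap fvbLine := by
  have : (fun (h : List Char) (v : String) => h ++ "  <p>".toList ++ v.toList ++ "</p>\n".toList)
      = fun h v => h ++ fvbLine v := by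
    funext h v; simp [fvbLine]
  rw [this, PySem.List.foldl_append_eq_flatMap]

theorem fvbA_loop2 (n : Nat) (l : List (Int × String)) (acc : List Char) :
    l.foldl
      (fun h p =>
        let h := h ++ "  <p>".toList ++ p.2.toList ++ "</p>\n".toList
        if PySem.Int.mod (p.1 + 1) 4 = 0 ∧ p.1 + 1 < (n : Int) then
          h ++ "  <p class=\"stanza-break\"></p>\n".toList
        else h) acc
      = acc ++ l.flatMap (fvbG n) := by
  have : (fun (h : List Char) (p : Int × String) =>
        let h := h ++ "  <p>".toList ++ p.2.toList ++ "</p>\n".toList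
        if PySem.Int.mod (p.1 + 1) 4 = 0 ∧ p.1 + 1 < (n : Int) then
          h ++ "  <p class=\"stanza-break\"></p>\n".toList
        else h)
      = fun h p => h ++ fvbG n p := by
    funext h p; simp only [fvbG, fvbLine]; split_ifs <;> simp
  rw [this, PySem.List.foldl_append_eq_flatMap]

theorem fvb_flatMap_no_sep (n : Nat) (xs : List String) (s : Int)
    (h : ∀ p ∈ PySem.List.enumerate xs s,
      ¬(PySem.Int.mod (p.1 + 1) 4 = 0 ∧ p.1 + 1 < (n : Int))) :
    (PySem.List.enumerate xs s).flatMap (fvbG n) = fvbGroup xs := by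
  induction xs generalizing s with
  | nil => simp [fvbGroup]
  | cons x xs ih =>
    rw [PySem.List.enumerate_cons]
    have h0 := h (s, x) (by rw [PySem.List.enumerate_cons]; exact List.mem_cons_self)
    simp only [List.flatMap_cons, fvbG, if_neg h0, fvbGroup, List.map_cons, List.flatten_cons]
    rw [ih (s + 1) (fun p hp => h p (by rw [PySem.List.enumerate_cons]; exact List.mem_cons_of_mem _ hp))]
    simp [fvbGroup, fvbLine]

theorem fvb_intercalate_cons_cons (sep x y : List Char) (zs : List (List Char)) :
    List.intercalate sep (x :: y :: zs) = x ++ sep ++ List.intercalate sep (y :: zs) := by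
  simp [List.intercalate, List.intersperse]

-- the core: the enumerated flatMap from a 4-aligned start equals the chunked join
theorem fvb_main_aux (m : Nat) : ∀ (l : List String) (k n : Nat), l.length ≤ m → k % 4 = 0 →
    k + l.length = n →
    (PySem.List.enumerate l (k : Int)).flatMap (fvbG n)
      = List.intercalate "  <p class=\"stanza-break\"></p>\n".toList
          ((fvbChunks l).map fvbGroup) := by
  induction m with
  | zero =>
    intro l k n hm hk hn
    have hl : l = [] := List.eq_nil_of_length_eq_zero (by omega)
    subst hl
    simp [fvbChunks, List.intercalate]
  | succ m IH =>
  intro l k n hm hk hn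
  match l with
  | [] => simp [fvbChunks, List.intercalate]
  | a :: xs =>
    by_cases hle : xs.length ≤ 3
    · -- one final (possibly short) chunk: no separator fires
      rw [fvbChunks_small a xs hle]
      have hno : ∀ p ∈ PySem.List.enumerate (a :: xs) (k : Int),
          ¬(PySem.Int.mod (p.1 + 1) 4 = 0 ∧ p.1 + 1 < (n : Int)) := by
        intro p hp
        rw [PySem.List.mem_enumerate_iff] at hp
        obtain ⟨j, hj, rfl⟩ := hp
        simp only [List.length_cons] at hj hn
        rintro ⟨hmod, hlt⟩
        rw [PySem.Int.mod_eq_zero_iff_dvd] at hmod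
        simp only at hlt
        omega
      rw [fvb_flatMap_no_sep n (a :: xs) (k : Int) hno]
      simp [List.intercalate]
    · rcases xs with _ | ⟨b, xs⟩
      · exact absurd (by simp) hle
      rcases xs with _ | ⟨c, xs⟩
      · exact absurd (by simp) hle
      rcases xs with _ | ⟨d, xs⟩
      · exact absurd (by simp) hle
      rcases xs with _ | ⟨r, rs⟩
      · exact absurd (by simp) hle
      -- l = a :: b :: c :: d :: r :: rs: no break after the first three lines, one after the fourth
      have e1 : ¬(PySem.Int.mod ((k : Int) + 1) 4 = 0 ∧ (k : Int) + 1 < (n : Int)) := by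
        rintro ⟨hmod, -⟩
        rw [PySem.Int.mod_eq_zero_iff_dvd] at hmod
        omega
      have e2 : ¬(PySem.Int.mod ((k : Int) + 1 + 1) 4 = 0 ∧ (k : Int) + 1 + 1 < (n : Int)) := by
        rintro ⟨hmod, -⟩
        rw [PySem.Int.mod_eq_zero_iff_dvd] at hmod
        omega
      have e3 : ¬(PySem.Int.mod ((k : Int) + 1 + 1 + 1) 4 = 0 ∧ (k : Int) + 1 + 1 + 1 < (n : Int)) := by
        rintro ⟨hmod, -⟩
        rw [PySem.Int.mod_eq_zero_iff_dvd] at hmod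
        omega
      have e4 : (PySem.Int.mod ((k : Int) + 1 + 1 + 1 + 1) 4 = 0 ∧ (k : Int) + 1 + 1 + 1 + 1 < (n : Int)) := by
        refine ⟨by rw [PySem.Int.mod_eq_zero_iff_dvd]; omega, ?_⟩
        simp only [List.length_cons] at hn
        omega
      have hm' : (r :: rs).length ≤ m := by
        simp only [List.length_cons] at hm ⊢; omega
      have ih := IH (r :: rs) (k + 4) n hm' (by omega)
        (by simp only [List.length_cons] at hn ⊢; omega)
      rw [show (((k + 4 : Nat)) : Int) = ((k : Int) + 1 + 1 + 1 + 1) by push_cast; ring] at ih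
      have hch : (fvbChunks (r :: rs)).map fvbGroup
          = fvbGroup (r :: rs.take 3) :: (fvbChunks (rs.drop 3)).map fvbGroup := by
        conv_lhs => rw [fvbChunks.eq_def]
        simp
      rw [show fvbChunks (a :: b :: c :: d :: r :: rs)
            = [a, b, c, d] :: fvbChunks (r :: rs) by rw [fvbChunks.eq_def]; simp]
      simp only [List.map_cons]
      rw [hch, fvb_intercalate_cons_cons, ← hch, ← ih]
      rw [PySem.List.enumerate_cons, PySem.List.enumerate_cons, PySem.List.enumerate_cons,
        PySem.List.enumerate_cons]
      simp only [List.flatMap_cons]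
      simp only [fvbG, if_neg e1, if_neg e2, if_neg e3, if_pos e4]
      simp only [fvbLine, fvbGroup, List.map_cons, List.map_nil, List.flatten_cons,
        List.flatten_nil]
      simp [List.append_assoc]

theorem fvb_main (l : List String) (k n : Nat) (hk : k % 4 = 0) (hn : k + l.length = n) :
    (PySem.List.enumerate l (k : Int)).flatMap (fvbG n)
      = List.intercalate "  <p class=\"stanza-break\"></p>\n".toList
          ((fvbChunks l).map fvbGroup) :=
  fvb_main_aux l.length l k n le_rfl hk hn

-- ===== VERDICT (by name: the statement is the Claim_ definition above) =====
theorem format_verse_block_spec : Claim_equal_format_verse_block := by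
  intro verses _
  unfold Spec_format_verse_block format_verse_block format_verse_block_alt
  by_cases hle : verses.length ≤ 4
  · rw [if_pos hle]
    congr 1
    rw [fvbA_loop1]
    congr 1
    congr 1
    match verses, hle with
    | [], _ => simp [fvbChunks, List.intercalate]
    | x :: xs, hle =>
      have hx : xs.length ≤ 3 := by simp at hle; omega
      rw [fvbChunks_small x xs hx, fvbGroup_flatMap]
      simp [List.intercalate]
  · rw [if_neg hle]
    congr 1
    rw [fvbA_loop2 verses.length]
    have := fvb_main verses 0 verses.length (by omega) (by omega)
    simp only [Nat.cast_zero] at this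
    rw [this]
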